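-- pv_equiv track=rewrite | github.com/gressman/covid_university | ptracker.py | dictionary_sum_copy
-- ===== SOURCE A (Python) =====
-- def dictionary_sum_copy(dict1,dict2):
--     result = {}
--     for dictN in [dict1,dict2]:
--         for key in dictN:
--             value = dictN[key]
--             if key not in result:
--                 result[key] = value
--             else:
--                 result[key] += value
--     return result
-- ===== SOURCE B (Python) =====
-- def dictionary_sum_copy(dict1, dict2):
--     # union of keys up front (dict1's order, then dict2-only keys), then one pass
--     # with a three-way branch looking each key up directly in the inputs
--     keys = list(dict1) + [k for k in dict2 if k not in dict1]
--     result = {}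
--     for k in keys:
--         if k in dict1 and k in dict2:
--             result[k] = dict1[k] + dict2[k]
--         elif k in dict1:
--             result[k] = dict1[k]
--         else:
--             result[k] = dict2[k]
--     return result
-- ===== Notes on version B (the rewrite author's own statement) =====
-- stated objective: alternative
-- what changed: B computes the ordered union of the two key sets up front and builds the result in one pass with a three-way branch that reads both input dicts directly, instead of A's accumulate-then-add mutation of a growing result dict.
import Mathlib
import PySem

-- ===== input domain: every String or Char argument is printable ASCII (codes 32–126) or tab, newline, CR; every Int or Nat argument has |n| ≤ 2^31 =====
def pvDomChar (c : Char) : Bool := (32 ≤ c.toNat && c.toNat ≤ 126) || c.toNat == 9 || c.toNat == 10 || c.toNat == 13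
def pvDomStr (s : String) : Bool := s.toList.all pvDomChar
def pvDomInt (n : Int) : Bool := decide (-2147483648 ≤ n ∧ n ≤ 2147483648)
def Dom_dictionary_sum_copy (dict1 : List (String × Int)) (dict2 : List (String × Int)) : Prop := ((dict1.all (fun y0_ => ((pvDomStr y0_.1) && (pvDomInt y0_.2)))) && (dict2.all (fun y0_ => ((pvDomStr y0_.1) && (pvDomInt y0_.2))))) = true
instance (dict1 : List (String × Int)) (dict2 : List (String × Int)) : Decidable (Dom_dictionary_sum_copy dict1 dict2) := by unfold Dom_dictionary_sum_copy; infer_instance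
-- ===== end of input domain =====

-- B builds the result in one pass over the ordered union of the key sets with a
-- three-way branch reading both inputs, instead of A's accumulate-then-add loop.


-- ===== PORT A =====
-- the loop body: result[key] = value if key fresh, else result[key] += value
def pvStepA (r : PySem.Dict String Int) (p : String × Int) : PySem.Dict String Int :=
  if r.contains p.1 then r.modify p.1 0 (· + p.2) else r.insert p.1 p.2

def dictionary_sum_copy (dict1 : List (String × Int)) (dict2 : List (String × Int)) : List (String × Int) :=
  ([dict1, dict2].foldl (fun result dictN => dictN.foldl pvStepA result) PySem.Dict.empty).items

-- ===== PORT B =====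
-- dict1[k] / dict2[k]: first-match lookup; the 0 default is unreachable (the branch guarantees presence)
def pvGet1 (d : List (String × Int)) (k : String) : Int := (List.lookup k d).getD 0

def dictionary_sum_copy_alt (dict1 : List (String × Int)) (dict2 : List (String × Int)) : List (String × Int) :=
  let keys1 := dict1.map Prod.fst
  let keys2 := dict2.map Prod.fst
  let keys := keys1 ++ keys2.filter (fun k => !keys1.contains k)
  (keys.foldl (fun result k =>
      if keys1.contains k && keys2.contains k then
        result.insert k (pvGet1 dict1 k + pvGet1 dict2 k)
      else if keys1.contains k then result.insert k (pvGet1 dict1 k)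
      else result.insert k (pvGet1 dict2 k)) PySem.Dict.empty).items

-- ===== PRECONDITION & SPEC =====
-- Pre_ only rules out association lists with a repeated key, which do not represent any
-- Python dict (A's parameters are dicts, whose keys are unique by construction).
def Pre_dictionary_sum_copy (dict1 : List (String × Int)) (dict2 : List (String × Int)) : Prop :=
  (dict1.map Prod.fst).Nodup ∧ (dict2.map Prod.fst).Nodup
instance (dict1 : List (String × Int)) (dict2 : List (String × Int)) : Decidable (Pre_dictionary_sum_copy dict1 dict2) := by unfold Pre_dictionary_sum_copy; infer_instance

def pvWitness_dictionary_sum_copy : (List (String × Int)) × (List (String × Int)) :=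
  ([("a", 1), ("b", 2)], [("b", 3), ("c", 4)])

def Spec_dictionary_sum_copy (dict1 : List (String × Int)) (dict2 : List (String × Int)) (out : List (String × Int)) : Prop := out = dictionary_sum_copy_alt dict1 dict2
instance (dict1 : List (String × Int)) (dict2 : List (String × Int)) (out : List (String × Int)) : Decidable (Spec_dictionary_sum_copy dict1 dict2 out) := by unfold Spec_dictionary_sum_copy; infer_instance

-- ===== CLAIM (what is proved, stated in full; the proofs are below) =====
def Claim_equal_dictionary_sum_copy : Prop := ∀ (dict1 : List (String × Int)) (dict2 : List (String × Int)), Dom_dictionary_sum_copy dict1 dict2 → Pre_dictionary_sum_copy dict1 dict2 → Spec_dictionary_sum_copy dict1 dict2 (dictionary_sum_copy dict1 dict2)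

-- ===== LEMMAS AND PROOFS =====

theorem pv_contains_mk_eq (l : List (String × Int)) (k : String) :
    (PySem.Dict.mk l).contains k = (l.map Prod.fst).contains k := by
  rw [Bool.eq_iff_iff, PySem.Dict.contains_iff_mem_keys, List.contains_iff_mem]
  rfl

theorem pv_lookup_of_mem {l : List (String × Int)} {p : String × Int}
    (hnd : (l.map Prod.fst).Nodup) (hm : p ∈ l) : List.lookup p.1 l = some p.2 := by
  induction l with
  | nil => cases hm
  | cons q rest ih =>
    simp only [List.map_cons, List.nodup_cons] at hnd
    rcases List.mem_cons.mp hm with h | h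
    · subst h; simp [List.lookup]
    · have hne : (p.1 == q.1) = false := by
        simp only [beq_eq_false_iff_ne, ne_eq]
        exact fun he => hnd.1 (he ▸ (List.mem_map.mpr ⟨p, h, rfl⟩))
      simp only [List.lookup, hne]
      exact ih hnd.2 h

-- phase 1 of A: folding over a list of pairs with pairwise-fresh keys appends them
theorem pv_foldl_stepA_fresh (l : List (String × Int)) (r : PySem.Dict String Int)
    (hnd : (l.map Prod.fst).Nodup) (hf : ∀ k ∈ l.map Prod.fst, r.contains k = false) :
    l.foldl pvStepA r = PySem.Dict.mk (r.items ++ l) := by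
  induction l generalizing r with
  | nil => apply PySem.Dict.ext; simp
  | cons p rest ih =>
    simp only [List.map_cons, List.nodup_cons] at hnd
    have hc : r.contains p.1 = false := hf p.1 (by simp)
    have hstep : pvStepA r p = r.insert p.1 p.2 := by simp [pvStepA, hc]
    rw [List.foldl_cons, hstep, ih _ hnd.2]
    · rw [PySem.Dict.items_insert_of_not_contains _ _ hc]
      simp
    · intro k hk
      rw [PySem.Dict.contains_insert]
      have hkne : (k == p.1) = false := by
        simp only [beq_eq_false_iff_ne, ne_eq]; exact fun he => hnd.1 (he ▸ hk)
      simp only [Bool.or_eq_false_iff]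
      exact ⟨hkne, hf k (by simp [hk])⟩

-- how phase 2 rewrites an already-present entry
def pvBump (l2 : List (String × Int)) (p : String × Int) : String × Int :=
  (p.1, if (l2.map Prod.fst).contains p.1 then p.2 + (List.lookup p.1 l2).getD 0 else p.2)

-- phase 2 of A: folding dict2 over an accumulated dict bumps existing entries and appends fresh ones
theorem pv_foldl_stepA_items (l : List (String × Int)) (r : PySem.Dict String Int)
    (hnd : (l.map Prod.fst).Nodup) (hr : r.keys.Nodup) :
    (l.foldl pvStepA r).items =
      r.items.map (pvBump l) ++ l.filter (fun p => !(r.contains p.1)) := by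
  induction l generalizing r with
  | nil =>
    have hid : r.items.map (pvBump []) = r.items := by
      rw [List.map_congr_left (g := id) (fun q _ => by simp [pvBump, id]), List.map_id]
    simp only [List.foldl_nil, List.filter_nil, List.append_nil, hid]
  | cons p rest ih =>
    simp only [List.map_cons, List.nodup_cons] at hnd
    have hmap : ∀ q ∈ r.items, q.1 ≠ p.1 → pvBump (p :: rest) q = pvBump rest q := by
      intro q _ hq
      have hqb : (q.1 == p.1) = false := by simpa using hq
      simp only [pvBump, List.map_cons, List.contains_cons, hqb, Bool.false_or, List.lookup]
    by_cases hc : r.contains p.1 = true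
    · have hstep : pvStepA r p = r.insert p.1 (r.getD p.1 0 + p.2) := by
        simp only [pvStepA, hc, if_true]; rfl
      rw [List.foldl_cons, hstep,
        ih _ hnd.2 (PySem.Dict.nodup_keys_insert _ _ _ hr)]
      rw [PySem.Dict.items_insert_of_contains _ _ hc, List.map_map]
      have hfilter : rest.filter (fun q => !((r.insert p.1 (r.getD p.1 0 + p.2)).contains q.1))
          = rest.filter (fun q => !(r.contains q.1)) := by
        apply List.filter_congr
        intro q hq
        have hqb : (q.1 == p.1) = false := by
          simp only [beq_eq_false_iff_ne, ne_eq]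
          exact fun he => hnd.1 (he ▸ (List.mem_map.mpr ⟨q, hq, rfl⟩))
        rw [PySem.Dict.contains_insert]
        simp [hqb]
      rw [hfilter]
      have hmap2 : r.items.map (pvBump rest ∘ fun q => if (q.1 == p.1) = true then (p.1, r.getD p.1 0 + p.2) else q)
          = r.items.map (pvBump (p :: rest)) := by
        apply List.map_congr_left
        intro q hq
        by_cases hqp : (q.1 == p.1) = true
        · have hq1 : q.1 = p.1 := by simpa using hqp
          have hv : r.getD p.1 0 = q.2 := by
            rw [← hq1]
            exact PySem.Dict.getD_of_mem_items _ (by simpa using hq) hr 0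
          have hnr : ((rest.map Prod.fst).contains p.1) = false := by
            simpa [List.contains_iff_mem] using hnd.1
          simp only [Function.comp_apply, if_true, pvBump, List.map_cons, hq1,
            List.contains_cons, BEq.rfl, Bool.true_or, if_true, List.lookup, hnr,
            Bool.false_eq_true, if_false, hv, Option.getD_some]
        · have hqb : (q.1 == p.1) = false := by simpa using hqp
          simp only [Function.comp_apply, hqb, Bool.false_eq_true, if_false]
          exact (hmap q hq (by simpa using hqb)).symm
      rw [hmap2]
      have hdrop : ((p :: rest).filter (fun q => !(r.contains q.1))) = rest.filter (fun q => !(r.contains q.1)) := by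
        simp [hc]
      rw [hdrop]
    · have hcf : r.contains p.1 = false := by simpa using hc
      have hstep : pvStepA r p = r.insert p.1 p.2 := by simp [pvStepA, hcf]
      rw [List.foldl_cons, hstep,
        ih _ hnd.2 (PySem.Dict.nodup_keys_insert _ _ _ hr)]
      rw [PySem.Dict.items_insert_of_not_contains _ _ hcf]
      have hfilter : rest.filter (fun q => !((r.insert p.1 p.2).contains q.1))
          = rest.filter (fun q => !(r.contains q.1)) := by
        apply List.filter_congr
        intro q hq
        have hqb : (q.1 == p.1) = false := by
          simp only [beq_eq_false_iff_ne, ne_eq]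
          exact fun he => hnd.1 (he ▸ (List.mem_map.mpr ⟨q, hq, rfl⟩))
        rw [PySem.Dict.contains_insert]
        simp [hqb]
      rw [hfilter]
      have hmap2 : (r.items ++ [p]).map (pvBump rest)
          = r.items.map (pvBump (p :: rest)) ++ [p] := by
        rw [List.map_append]
        congr 1
        · apply List.map_congr_left
          intro q hq
          refine (hmap q hq ?_).symm
          intro he
          have hcq : r.contains q.1 = true := by
            rw [PySem.Dict.contains_iff_mem_keys]
            exact List.mem_map.mpr ⟨q, hq, rfl⟩
          rw [he, hcf] at hcq; cases hcq
        · have hnp : ((rest.map Prod.fst).contains p.1) = false := by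
            simpa [List.contains_iff_mem] using hnd.1
          simp only [pvBump, hnp, Bool.false_eq_true, if_false, List.map_cons, List.map_nil]
      rw [hmap2, List.append_assoc]
      congr 1
      simp [hcf]

-- the value B stores for each key of the union
def pvValB (dict1 dict2 : List (String × Int)) (k : String) : Int :=
  if (dict1.map Prod.fst).contains k && (dict2.map Prod.fst).contains k then
    pvGet1 dict1 k + pvGet1 dict2 k
  else if (dict1.map Prod.fst).contains k then pvGet1 dict1 k
  else pvGet1 dict2 k

-- B's loop inserts each union key exactly once, so its items are the mapped union
theorem pv_B_items (dict1 dict2 : List (String × Int))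
    (hnd1 : (dict1.map Prod.fst).Nodup) (hnd2 : (dict2.map Prod.fst).Nodup) :
    dictionary_sum_copy_alt dict1 dict2 =
      ((dict1.map Prod.fst) ++ (dict2.map Prod.fst).filter
          (fun k => !(dict1.map Prod.fst).contains k)).map
        (fun k => (k, pvValB dict1 dict2 k)) := by
  unfold dictionary_sum_copy_alt
  have hstep : (fun (result : PySem.Dict String Int) k =>
      if (dict1.map Prod.fst).contains k && (dict2.map Prod.fst).contains k then
        result.insert k (pvGet1 dict1 k + pvGet1 dict2 k)
      else if (dict1.map Prod.fst).contains k then result.insert k (pvGet1 dict1 k)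
      else result.insert k (pvGet1 dict2 k))
      = fun (result : PySem.Dict String Int) k => result.insert k (pvValB dict1 dict2 k) := by
    funext result k
    unfold pvValB
    split_ifs <;> rfl
  have hnodup : (((dict1.map Prod.fst) ++ (dict2.map Prod.fst).filter
      (fun k => !(dict1.map Prod.fst).contains k)).map (fun x => x)).Nodup := by
    simp only [List.map_id_fun', id]
    rw [List.nodup_append]
    refine ⟨hnd1, List.Nodup.filter (fun k => !(dict1.map Prod.fst).contains k) hnd2,
      fun k hk1 k' hk2 => ?_⟩
    intro he
    subst he
    have h2 := (List.mem_filter.mp hk2).2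
    rw [Bool.not_eq_eq_eq_not, Bool.not_true] at h2
    rw [← List.contains_iff_mem] at hk1
    rw [hk1] at h2; cases h2
  have h := PySem.Dict.items_foldl_insert_fresh
    ((dict1.map Prod.fst) ++ (dict2.map Prod.fst).filter (fun k => !(dict1.map Prod.fst).contains k))
    (fun x => x) (pvValB dict1 dict2) PySem.Dict.empty (fun a _ => rfl) hnodup
  show (List.foldl (fun (result : PySem.Dict String Int) k =>
      if (dict1.map Prod.fst).contains k && (dict2.map Prod.fst).contains k then
        result.insert k (pvGet1 dict1 k + pvGet1 dict2 k)
      else if (dict1.map Prod.fst).contains k then result.insert k (pvGet1 dict1 k)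
      else result.insert k (pvGet1 dict2 k)) PySem.Dict.empty
      ((dict1.map Prod.fst) ++ (dict2.map Prod.fst).filter
        (fun k => !(dict1.map Prod.fst).contains k))).items = _
  rw [hstep]
  exact h
-- helper: after the first phase the accumulator is literally dict1
theorem pv_A_phase1 (dict1 dict2 : List (String × Int)) (hnd1 : (dict1.map Prod.fst).Nodup) :
    dictionary_sum_copy dict1 dict2 = (dict2.foldl pvStepA (PySem.Dict.mk dict1)).items := by
  unfold dictionary_sum_copy
  simp only [List.foldl_cons, List.foldl_nil]
  rw [pv_foldl_stepA_fresh dict1 PySem.Dict.empty hnd1 (fun k _ => rfl)]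
  rfl

-- ===== VERDICT (by name: the statement is the Claim_ definition above) =====
theorem dictionary_sum_copy_spec : Claim_equal_dictionary_sum_copy := by
  intro dict1 dict2 _ hpre
  obtain ⟨hnd1, hnd2⟩ := hpre
  unfold Spec_dictionary_sum_copy
  rw [pv_B_items dict1 dict2 hnd1 hnd2, pv_A_phase1 dict1 dict2 hnd1]
  have hkeys : (PySem.Dict.mk dict1).keys.Nodup := hnd1
  rw [pv_foldl_stepA_items dict2 _ hnd2 hkeys, List.map_append]
  have hmkitems : (PySem.Dict.mk dict1).items = dict1 := rfl
  rw [hmkitems]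
  congr 1
  · -- dict1 part
    rw [List.map_map]
    apply List.map_congr_left
    intro p hp
    have hl1 : List.lookup p.1 dict1 = some p.2 := pv_lookup_of_mem hnd1 hp
    have hm1 : ((dict1.map Prod.fst).contains p.1) = true := by
      rw [List.contains_iff_mem]; exact List.mem_map.mpr ⟨p, hp, rfl⟩
    by_cases hm2 : ((dict2.map Prod.fst).contains p.1) = true
    · simp only [Function.comp_apply, pvBump, pvValB, pvGet1, hm1, hm2, Bool.and_self,
        if_true, hl1, Option.getD_some]
    · have hm2f : ((dict2.map Prod.fst).contains p.1) = false := by simpa using hm2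
      simp only [Function.comp_apply, pvBump, pvValB, pvGet1, hm1, hm2f, Bool.and_false,
        Bool.false_eq_true, if_false, if_true, hl1, Option.getD_some]
  · -- dict2-only part
    have h1 : dict2.filter (fun p => !((PySem.Dict.mk dict1).contains p.1))
        = dict2.filter (fun p => !((dict1.map Prod.fst).contains p.1)) := by
      apply List.filter_congr; intro p _; rw [pv_contains_mk_eq]
    rw [h1]
    have h2 : ((dict2.map Prod.fst).filter (fun k => !((dict1.map Prod.fst).contains k)))
        = (dict2.filter (fun p => !((dict1.map Prod.fst).contains p.1))).map Prod.fst := by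
      rw [List.filter_map]; rfl
    rw [h2, List.map_map]
    have hpt : ∀ p ∈ dict2.filter (fun p => !((dict1.map Prod.fst).contains p.1)),
        ((fun k => (k, pvValB dict1 dict2 k)) ∘ Prod.fst) p = id p := by
      intro p hp
      have hp2 : p ∈ dict2 := (List.mem_filter.mp hp).1
      have hnm1 : ((dict1.map Prod.fst).contains p.1) = false := by
        have := (List.mem_filter.mp hp).2; simpa using this
      have hm2 : ((dict2.map Prod.fst).contains p.1) = true := by
        rw [List.contains_iff_mem]; exact List.mem_map.mpr ⟨p, hp2, rfl⟩
      simp only [Function.comp_apply, pvValB, pvGet1, hnm1, hm2, Bool.false_and,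
        Bool.false_eq_true, if_false, pv_lookup_of_mem hnd2 hp2, Option.getD_some, id]
    rw [List.map_congr_left hpt, List.map_id]
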